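-- pv_equiv track=rewrite | github.com/tfredrick112/project-rosalind | finding_shared_motif.py | common_substr
-- ===== SOURCE A (Python) =====
-- def common_substr(string, seqs, length):
--     """
--     Finds a common substring of length 'length' for all the strings in seqs.
--     Returns an empty string if a common substring of required length does
--     not exist.
--     """
--     for start in range(len(string) - length + 1):
--         part = string[start:start+length]
--         for seq in seqs:
--             if part not in seq:
--                 break
--         else:
--             return part
--     return ""
-- ===== SOURCE B (Python) =====
-- def common_substr(string, seqs, length):
--     """
--     Finds a common substring of length 'length' for all the strings in seqs.
--     Returns an empty string if a common substring of required length does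
--     not exist.
--     B: build the set of length-`length` substrings of each seq once,
--     intersecting as it goes (bailing out when the intersection dies); then
--     walk `string` once, testing each window against the intersection instead
--     of searching every seq per window.
--     """
--     common = None
--     for seq in seqs:
--         subs = {seq[i:i+length] for i in range(len(seq) - length + 1)}
--         common = subs if common is None else common & subs
--         if not common:
--             return ""
--     n = len(string)
--     if common is None:
--         return string[:length] if length <= n else ""
--     start = 0
--     while start + length <= n:
--         part = string[start:start+length]
--         if part in common:
--             return part
--         start += 1
--     return ""
-- ===== Notes on version B (the rewrite author's own statement) =====
-- stated objective: faster
-- what changed: Replaces A's per-window substring search inside every seq by a precomputed intersection of each seq's set of length-L substrings, so the scan over string does one set-membership test per window instead of a search in every seq.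
-- outside the precondition, e.g. on common_substr('abc', ['ab'], -1): A returns 'ab', B returns ''
import Mathlib
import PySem

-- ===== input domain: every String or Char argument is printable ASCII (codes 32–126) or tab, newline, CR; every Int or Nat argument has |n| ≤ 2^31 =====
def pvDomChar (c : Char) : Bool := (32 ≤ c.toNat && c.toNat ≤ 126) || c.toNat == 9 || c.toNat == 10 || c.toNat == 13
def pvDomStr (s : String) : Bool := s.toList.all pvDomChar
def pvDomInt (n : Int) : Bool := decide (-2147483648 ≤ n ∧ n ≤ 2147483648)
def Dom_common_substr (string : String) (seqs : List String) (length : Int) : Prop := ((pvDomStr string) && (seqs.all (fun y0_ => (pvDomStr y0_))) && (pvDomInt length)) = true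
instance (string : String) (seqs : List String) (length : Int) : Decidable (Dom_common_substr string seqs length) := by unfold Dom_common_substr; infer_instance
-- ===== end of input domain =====

-- B intersects the per-seq sets of length-`length` substrings once (bailing out when the
-- intersection dies), then walks `string` with one set-membership test per window; the timing
-- run measured it faster than A's per-window search at the largest generated sizes.

-- ===== PORT A =====
-- the outer 'for start in range(...)' loop: first window contained in every seq, else ""
def commonA_go (string : String) (seqs : List String) (length : Int) : List Int → String
  | [] => ""
  | start :: rest =>
    let part := PySem.Str.slice string (some start) (some (start + length))
    -- 'for seq in seqs: if part not in seq: break / else: return part'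
    if seqs.all (fun seq => PySem.Str.isIn part seq) then part
    else commonA_go string seqs length rest

def common_substr (string : String) (seqs : List String) (length : Int) : String :=
  commonA_go string seqs length (PySem.List.pyRange 0 (PySem.Str.len string - length + 1) 1)

-- ===== PORT B =====
-- {seq[i:i+length] for i in range(len(seq)-length+1)}
def commonB_subs (seq : String) (length : Int) : PySem.Set String :=
  PySem.Set.ofList ((PySem.List.pyRange 0 (PySem.Str.len seq - length + 1) 1).map
    (fun i => PySem.Str.slice seq (some i) (some (i + length))))

-- B's first loop; '.inr ()' is the early 'return ""' taken when the intersection is empty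
def commonB_loop (length : Int) (common : Option (PySem.Set String)) :
    List String → Sum (Option (PySem.Set String)) Unit
  | [] => .inl common
  | seq :: rest =>
    let subs := commonB_subs seq length
    let c := match common with
      | none => subs
      | some c0 => PySem.Set.inter c0 subs
    if PySem.Set.len c = 0 then .inr ()
    else commonB_loop length (some c) rest

-- B's while loop: 'while start + length <= n: ... start += 1'
def commonB_while (string : String) (length : Int) (c : PySem.Set String) (start : Int) : String :=
  if h : start + length ≤ PySem.Str.len string then
    let part := PySem.Str.slice string (some start) (some (start + length))
    if PySem.Set.contains c part then part
    else commonB_while string length c (start + 1)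
  else ""
termination_by (PySem.Str.len string - length + 1 - start).toNat
decreasing_by omega

def common_substr_alt (string : String) (seqs : List String) (length : Int) : String :=
  match commonB_loop length none seqs with
  | .inr _ => ""
  | .inl none =>
    if length ≤ PySem.Str.len string then PySem.Str.slice string none (some length) else ""
  | .inl (some c) => commonB_while string length c 0

-- ===== PRECONDITION & SPEC =====
-- Pre_ excludes negative `length`, an unspecified corner: there Python's negative slice bound
-- makes A return windows of length len(string)+length instead of the requested length, while
-- B's natural answer is "" (no substring of negative length exists).
def Pre_common_substr (string : String) (seqs : List String) (length : Int) : Prop := 0 ≤ length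
instance (string : String) (seqs : List String) (length : Int) : Decidable (Pre_common_substr string seqs length) := by unfold Pre_common_substr; infer_instance

def pvWitness_common_substr : String × List String × Int := ("GATTACA", ["TTAC", "ATTA"], 3)

def Spec_common_substr (string : String) (seqs : List String) (length : Int) (out : String) : Prop := out = common_substr_alt string seqs length
instance (string : String) (seqs : List String) (length : Int) (out : String) : Decidable (Spec_common_substr string seqs length out) := by unfold Spec_common_substr; infer_instance

-- ===== CLAIM (what is proved, stated in full; the proofs are below) =====
def Claim_equal_common_substr : Prop := ∀ (string : String) (seqs : List String) (length : Int), Dom_common_substr string seqs length → Pre_common_substr string seqs length → Spec_common_substr string seqs length (common_substr string seqs length)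

-- ===== LEMMAS AND PROOFS =====

-- a window of exact length L is in seq's substring set iff it is a substring of seq
lemma mem_subs_iff (seq : String) (L : Nat) (p : String) (hp : p.toList.length = L) :
    p ∈ commonB_subs seq (L : Int) ↔ PySem.Str.isIn p seq = true := by
  rw [PySem.Str.isIn_iff_infix]
  unfold commonB_subs
  rw [PySem.Set.mem_ofList, List.mem_map]
  constructor
  · rintro ⟨i, hi, rfl⟩
    rw [PySem.List.mem_pyRange_one] at hi
    obtain ⟨h0, h1⟩ := hi
    obtain ⟨j, rfl⟩ := Int.eq_ofNat_of_zero_le h0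
    have hs : (PySem.Str.slice seq (some (j : Int)) (some ((j:Int) + L))).toList
        = (seq.toList.drop j).take L := by simp [pysem]
    rw [hs]
    exact ((seq.toList.drop j).take_prefix L).isInfix.trans (seq.toList.drop_suffix j).isInfix
  · intro h
    obtain ⟨s, t, hst⟩ := h
    have hlen : seq.toList.length = s.length + L + t.length := by
      rw [← hst]; simp [hp]; omega
    refine ⟨(s.length : Int), ?_, ?_⟩
    · rw [PySem.List.mem_pyRange_one]
      refine ⟨by omega, ?_⟩
      have hl : PySem.Str.len seq = (seq.toList.length : Int) := by simp [pysem]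
      rw [hl]; omega
    · apply String.toList_inj.mp
      have hs : (PySem.Str.slice seq (some (s.length : Int)) (some ((s.length : Int) + L))).toList
          = (seq.toList.drop s.length).take L := by simp [pysem]
      rw [hs, ← hst]
      rw [show s ++ p.toList ++ t = s ++ (p.toList ++ t) by simp]
      rw [List.drop_left, List.take_left' hp]

-- membership in the iterated intersection
lemma mem_foldl_inter (seqs : List String) (length : Int) (c : PySem.Set String) (p : String) :
    p ∈ seqs.foldl (fun c seq => PySem.Set.inter c (commonB_subs seq length)) c
      ↔ p ∈ c ∧ ∀ seq ∈ seqs, p ∈ commonB_subs seq length := by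
  induction seqs generalizing c with
  | nil => simp
  | cons a l ih =>
    simp [List.foldl, ih, PySem.Set.mem_inter]
    tauto

-- if B's first loop runs to the end, its accumulator is the full intersection
lemma loop_inl_some (length : Int) (l : List String) (c : PySem.Set String)
    (r : Option (PySem.Set String)) (h : commonB_loop length (some c) l = .inl r) :
    r = some (l.foldl (fun c seq => PySem.Set.inter c (commonB_subs seq length)) c) := by
  induction l generalizing c with
  | nil => simpa [commonB_loop] using h.symm
  | cons a l ih =>
    rw [commonB_loop] at h
    by_cases h0 : PySem.Set.len (PySem.Set.inter c (commonB_subs a length)) = 0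
    · rw [if_pos h0] at h
      cases h
    · rw [if_neg h0] at h
      rw [List.foldl_cons]
      exact ih _ h

-- if B's first loop bailed out, nothing lies in the accumulator and all the remaining sets
lemma loop_inr (length : Int) (l : List String) (c : PySem.Set String)
    (h : commonB_loop length (some c) l = .inr ()) (p : String)
    (hp : p ∈ c) (hall : ∀ seq ∈ l, p ∈ commonB_subs seq length) : False := by
  induction l generalizing c with
  | nil => simp [commonB_loop] at h
  | cons a l ih =>
    rw [commonB_loop] at h
    have hp1 : p ∈ PySem.Set.inter c (commonB_subs a length) :=
      (PySem.Set.mem_inter ..).mpr ⟨hp, hall a (List.mem_cons_self ..)⟩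
    by_cases h0 : PySem.Set.len (PySem.Set.inter c (commonB_subs a length)) = 0
    · have : PySem.Set.inter c (commonB_subs a length) = [] := by
        simp [PySem.Set.len] at h0
        exact h0
      rw [this] at hp1
      exact absurd hp1 (List.not_mem_nil)
    · rw [if_neg h0] at h
      exact ih _ h hp1 (fun s hs => hall s (List.mem_cons_of_mem _ hs))

-- B's window test equals A's 'part in every seq' test, for windows of exact length L
lemma common_cond (a : String) (l : List String) (L : Nat) (c : PySem.Set String)
    (hc : c = l.foldl (fun c seq => PySem.Set.inter c (commonB_subs seq (L : Int)))
      (commonB_subs a (L : Int)))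
    (p : String) (hp : p.toList.length = L) :
    PySem.Set.contains c p = (a :: l).all (fun seq => PySem.Str.isIn p seq) := by
  apply Bool.coe_iff_coe.mp
  simp only [PySem.Set.contains_iff]
  rw [hc, mem_foldl_inter]
  simp only [List.all_cons, List.all_eq_true, Bool.and_eq_true]
  rw [mem_subs_iff a L p hp]
  constructor
  · rintro ⟨h1, h2⟩
    exact ⟨h1, fun x hx => (mem_subs_iff x L p hp).mp (h2 x hx)⟩
  · rintro ⟨h1, h2⟩
    exact ⟨h1, fun x hx => (mem_subs_iff x L p hp).mpr (h2 x hx)⟩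

-- every window the scan looks at has exactly L characters
lemma part_len (string : String) (L : Nat) (s : Int) (h0 : 0 ≤ s)
    (h1 : s + L ≤ (string.toList.length : Int)) :
    (PySem.Str.slice string (some s) (some (s + L))).toList.length = L := by
  obtain ⟨j, rfl⟩ := Int.eq_ofNat_of_zero_le h0
  have hs : (PySem.Str.slice string (some (j : Int)) (some ((j:Int) + L))).toList
      = (string.toList.drop j).take L := by simp [pysem]
  rw [hs]
  have hls : string.toList.length = string.length := String.length_toList
  simp
  omega

-- when no length-L string passes A's test, A's scan returns ""
lemma A_ret_empty (string : String) (seqs : List String) (L : Nat)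
    (hfalse : ∀ p : String, p.toList.length = L →
      (seqs.all (fun seq => PySem.Str.isIn p seq)) = false)
    (starts : List Int)
    (hb : ∀ s ∈ starts, 0 ≤ s ∧ s + L ≤ (string.toList.length : Int)) :
    commonA_go string seqs (L : Int) starts = "" := by
  induction starts with
  | nil => rfl
  | cons s rest ih =>
    obtain ⟨h0, h1⟩ := hb s (List.mem_cons_self ..)
    unfold commonA_go
    simp only [hfalse _ (part_len string L s h0 h1), Bool.false_eq_true, if_false]
    exact ih (fun x hx => hb x (List.mem_cons_of_mem _ hx))

-- A's range scan and B's while loop agree from any start on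
lemma scan_eq (string : String) (a : String) (l : List String) (L : Nat) (c : PySem.Set String)
    (hc : c = l.foldl (fun c seq => PySem.Set.inter c (commonB_subs seq (L : Int)))
      (commonB_subs a (L : Int))) :
    ∀ (k : Nat) (start : Int), 0 ≤ start →
      k = (PySem.Str.len string - L + 1 - start).toNat →
      commonA_go string (a :: l) (L : Int) (PySem.List.pyRange start (PySem.Str.len string - L + 1) 1)
        = commonB_while string (L : Int) c start := by
  have hl : PySem.Str.len string = (string.toList.length : Int) := by simp [pysem]
  intro k
  induction k with
  | zero =>
    intro start h0 hk
    rw [PySem.List.pyRange_one_eq_nil (by omega)]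
    rw [commonB_while, dif_neg (by omega)]
    rfl
  | succ k ih =>
    intro start h0 hk
    by_cases hcont : start < PySem.Str.len string - L + 1
    · rw [PySem.List.pyRange_one_cons hcont]
      rw [commonB_while, dif_pos (by omega)]
      unfold commonA_go
      have hlen : (PySem.Str.slice string (some start) (some (start + L))).toList.length = L :=
        part_len string L start h0 (by omega)
      simp only [common_cond a l L c hc _ hlen]
      rw [ih (start + 1) (by omega) (by omega)]
    · rw [PySem.List.pyRange_one_eq_nil (by omega)]
      rw [commonB_while, dif_neg (by omega)]
      rfl

-- ===== VERDICT (by name: the statement is the Claim_ definition above) =====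
theorem common_substr_spec : Claim_equal_common_substr := by
  intro string seqs length _ hpre
  unfold Spec_common_substr
  obtain ⟨L, rfl⟩ := Int.eq_ofNat_of_zero_le hpre
  have hl : PySem.Str.len string = (string.toList.length : Int) := by simp [pysem]
  cases seqs with
  | nil =>
    show common_substr string [] (L : Int) = common_substr_alt string [] (L : Int)
    unfold common_substr common_substr_alt commonB_loop
    by_cases hle : (L : Int) ≤ PySem.Str.len string
    · rw [if_pos hle]
      rw [PySem.List.pyRange_one_cons (by omega)]
      unfold commonA_go
      simp only [List.all_nil, if_true]
      apply String.toList_inj.mp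
      simp [pysem]
    · rw [if_neg hle]
      rw [PySem.List.pyRange_one_eq_nil (by omega)]
      rfl
  | cons a l =>
    show common_substr string (a :: l) (L : Int) = common_substr_alt string (a :: l) (L : Int)
    unfold common_substr common_substr_alt
    rw [show commonB_loop (L : Int) none (a :: l)
        = (if PySem.Set.len (commonB_subs a (L : Int)) = 0 then .inr ()
           else commonB_loop (L : Int) (some (commonB_subs a (L : Int))) l) from rfl]
    by_cases h0 : PySem.Set.len (commonB_subs a (L : Int)) = 0
    · rw [if_pos h0]
      apply A_ret_empty string (a :: l) L
      · intro p hp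
        by_contra hT
        rw [Bool.not_eq_false, List.all_cons, Bool.and_eq_true] at hT
        have : p ∈ commonB_subs a (L : Int) := (mem_subs_iff a L p hp).mpr hT.1
        have he : commonB_subs a (L : Int) = [] := by
          simp [PySem.Set.len] at h0
          exact h0
        rw [he] at this
        exact absurd this (List.not_mem_nil)
      · intro s hs
        rw [PySem.List.mem_pyRange_one] at hs
        exact ⟨hs.1, by omega⟩
    · rw [if_neg h0]
      cases hr : commonB_loop (L : Int) (some (commonB_subs a (L : Int))) l with
      | inr u =>
        cases u
        apply A_ret_empty string (a :: l) L
        · intro p hp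
          by_contra hT
          rw [Bool.not_eq_false, List.all_cons, Bool.and_eq_true] at hT
          exact loop_inr (L : Int) l _ hr p ((mem_subs_iff a L p hp).mpr hT.1)
            (fun s hs => (mem_subs_iff s L p hp).mpr (List.all_eq_true.mp hT.2 s hs))
        · intro s hs
          rw [PySem.List.mem_pyRange_one] at hs
          exact ⟨hs.1, by omega⟩
      | inl r =>
        obtain rfl := loop_inl_some (L : Int) l _ r hr
        exact scan_eq string a l L _ rfl _ 0 le_rfl rfl
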